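-- pv_equiv track=rewrite | github.com/HashedAlex/PolyDelta | scraper/context_builder.py | _expand_team
-- ===== SOURCE A (Python) =====
-- from typing import List, Optional
--
-- _ALIASES = {
--     # EPL
--     "man utd": "manchester united",
--     "man united": "manchester united",
--     "man city": "manchester city",
--     "wolves": "wolverhampton",
--     "spurs": "tottenham",
--     "saints": "southampton",
--     "toon": "newcastle",
--     "villa": "aston villa",
--     "forest": "nottingham forest",
--     "nottm forest": "nottingham forest",
--     "west ham": "west ham united",
--     # NBA
--     "sixers": "76ers",
--     "blazers": "trail blazers",
--     "wolves": "timberwolves",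
-- }
--
-- def _expand_team(name: str) -> List[str]:
--     """Return a list of lowercase search variants for a team name."""
--     low = name.lower().strip()
--     variants = [low]
--     # Add alias expansions
--     for alias, full in _ALIASES.items():
--         if alias == low:
--             variants.append(full)
--         elif full == low:
--             variants.append(alias)
--     # Also add individual words for multi-word names (e.g. "Lakers" from "Los Angeles Lakers")
--     words = low.split()
--     if len(words) > 1:
--         variants.append(words[-1])  # last word is usually the mascot/short name
--     return variants
-- ===== SOURCE B (Python) =====
-- from typing import List
--
-- _ALIASES = {
--     # EPL
--     "man utd": "manchester united",
--     "man united": "manchester united",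
--     "man city": "manchester city",
--     "wolves": "wolverhampton",
--     "spurs": "tottenham",
--     "saints": "southampton",
--     "toon": "newcastle",
--     "villa": "aston villa",
--     "forest": "nottingham forest",
--     "nottm forest": "nottingham forest",
--     "west ham": "west ham united",
--     # NBA
--     "sixers": "76ers",
--     "blazers": "trail blazers",
--     "wolves": "timberwolves",
-- }
--
-- # Precomputed once at import: the COMPLETE answer for every known team name
-- # (aliases and full names), including the last-word variant, so the call for a
-- # known name is a single lookup of a finished list; unknown names take a short
-- # general-formula path with no alias logic at all.
-- _KNOWN: dict = {}
-- for _a, _f in _ALIASES.items():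
--     _KNOWN.setdefault(_a, [_a]).append(_f)
--     _KNOWN.setdefault(_f, [_f]).append(_a)
-- for _k, _v in _KNOWN.items():
--     _w = _k.split()
--     if len(_w) > 1:
--         _v.append(_w[-1])
--
-- def _expand_team(name: str) -> List[str]:
--     """Return a list of lowercase search variants for a team name."""
--     low = name.lower().strip()
--     hit = _KNOWN.get(low)
--     if hit is not None:
--         return list(hit)
--     words = low.split()
--     return [low, words[-1]] if len(words) > 1 else [low]
-- ===== Notes on version B (the rewrite author's own statement) =====
-- stated objective: alternative
-- what changed: B builds, once at import, a table of COMPLETE answers (alias expansions plus the last-word variant) for every known team name, so a call is a single dict hit returning a finished list, with a short alias-free general-formula fallback for unknown names; A scans all alias pairs and recomputes the last-word step on every call.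
import Mathlib
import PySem

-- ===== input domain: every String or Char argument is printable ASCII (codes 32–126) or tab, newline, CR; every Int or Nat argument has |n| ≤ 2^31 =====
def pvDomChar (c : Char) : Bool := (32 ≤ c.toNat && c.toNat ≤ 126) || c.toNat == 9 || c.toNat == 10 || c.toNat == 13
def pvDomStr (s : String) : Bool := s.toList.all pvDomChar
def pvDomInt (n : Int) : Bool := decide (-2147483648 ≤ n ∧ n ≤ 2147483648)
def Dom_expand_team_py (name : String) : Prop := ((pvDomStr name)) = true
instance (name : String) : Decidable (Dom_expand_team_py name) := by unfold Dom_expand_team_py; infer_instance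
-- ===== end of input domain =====

-- B precomputes, once at import, the complete answer (including the last-word variant) for
-- every known team name; the call is then a single lookup, with a short alias-free fallback.

-- ===== PORT A =====
-- the _ALIASES dict literal, after the duplicate "wolves" key resolves (first position, last value)
def pvAliasItems : List (String × String) := [("man utd", "manchester united"),
  ("man united", "manchester united"),
  ("man city", "manchester city"),
  ("wolves", "timberwolves"),
  ("spurs", "tottenham"),
  ("saints", "southampton"),
  ("toon", "newcastle"),
  ("villa", "aston villa"),
  ("forest", "nottingham forest"),
  ("nottm forest", "nottingham forest"),
  ("west ham", "west ham united"),
  ("sixers", "76ers"),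
  ("blazers", "trail blazers")]

def expand_team_py (name : String) : List String :=
  let low := PySem.Str.strip (PySem.Str.lower name)
  let variants := pvAliasItems.foldl
    (fun acc p => if p.1 = low then acc ++ [p.2] else if p.2 = low then acc ++ [p.1] else acc)
    [low]
  let words := PySem.Str.split₀ low
  if words.length > 1 then variants ++ [PySem.List.pyGetD words (-1) ""] else variants

-- ===== PORT B =====
-- _KNOWN, built at module level: first both setdefault(...).append(...) passes over the
-- alias pairs, then the in-place last-word append over the table's own entries
def pvKnown : PySem.Dict String (List String) :=
  let d := pvAliasItems.foldl
    (fun d p => (d.modify p.1 [p.1] (fun l => l ++ [p.2])).modify p.2 [p.2] (fun l => l ++ [p.1]))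
    PySem.Dict.empty
  d.items.foldl
    (fun d kv =>
      let w := PySem.Str.split₀ kv.1
      if w.length > 1 then d.modify kv.1 [] (fun l => l ++ [PySem.List.pyGetD w (-1) ""]) else d)
    d

def expand_team_py_alt (name : String) : List String :=
  let low := PySem.Str.strip (PySem.Str.lower name)
  match pvKnown.get? low with
  | some hit => hit
  | none =>
    let words := PySem.Str.split₀ low
    if words.length > 1 then [low, PySem.List.pyGetD words (-1) ""] else [low]

-- ===== PRECONDITION & SPEC =====
def Spec_expand_team_py (name : String) (out : List String) : Prop := out = expand_team_py_alt name
instance (name : String) (out : List String) : Decidable (Spec_expand_team_py name out) := by unfold Spec_expand_team_py; infer_instance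

-- ===== CLAIM (what is proved, stated in full; the proofs are below) =====
def Claim_equal_expand_team_py : Prop := ∀ (name : String), Dom_expand_team_py name → Spec_expand_team_py name (expand_team_py name)

-- ===== LEMMAS AND PROOFS =====
-- the prebuilt table, evaluated (proof-side characterisation of pvKnown)
theorem pvKnown_eval : pvKnown = PySem.Dict.mk [("man utd", ["man utd", "manchester united", "utd"]), ("manchester united", ["manchester united", "man utd", "man united", "united"]), ("man united", ["man united", "manchester united", "united"]), ("man city", ["man city", "manchester city", "city"]), ("manchester city", ["manchester city", "man city", "city"]), ("wolves", ["wolves", "timberwolves"]), ("timberwolves", ["timberwolves", "wolves"]), ("spurs", ["spurs", "tottenham"]), ("tottenham", ["tottenham", "spurs"]), ("saints", ["saints", "southampton"]), ("southampton", ["southampton", "saints"]), ("toon", ["toon", "newcastle"]), ("newcastle", ["newcastle", "toon"]), ("villa", ["villa", "aston villa"]), ("aston villa", ["aston villa", "villa", "villa"]), ("forest", ["forest", "nottingham forest"]), ("nottingham forest", ["nottingham forest", "forest", "nottm forest", "forest"]), ("nottm forest", ["nottm forest", "nottingham forest", "forest"]), ("west ham", ["west ham", "west ham united", "ham"]), ("west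 ham united", ["west ham united", "west ham", "united"]), ("sixers", ["sixers", "76ers"]), ("76ers", ["76ers", "sixers"]), ("blazers", ["blazers", "trail blazers"]), ("trail blazers", ["trail blazers", "blazers", "blazers"])] := by decide

-- A's full per-call computation and B's table lookup (with fallback) agree for every string
theorem pv_core_eq (s : String) :
    (if (PySem.Str.split₀ s).length > 1 then
        (pvAliasItems.foldl
          (fun acc p => if p.1 = s then acc ++ [p.2] else if p.2 = s then acc ++ [p.1] else acc)
          [s]) ++ [PySem.List.pyGetD (PySem.Str.split₀ s) (-1) ""]
      else
        pvAliasItems.foldl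
          (fun acc p => if p.1 = s then acc ++ [p.2] else if p.2 = s then acc ++ [p.1] else acc)
          [s])
    = (match pvKnown.get? s with
      | some hit => hit
      | none =>
        if (PySem.Str.split₀ s).length > 1 then [s, PySem.List.pyGetD (PySem.Str.split₀ s) (-1) ""]
        else [s]) := by
  rcases eq_or_ne s "man utd" with h | h_0
  · subst h; decide
  rcases eq_or_ne s "manchester united" with h | h_1
  · subst h; decide
  rcases eq_or_ne s "man united" with h | h_2
  · subst h; decide
  rcases eq_or_ne s "man city" with h | h_3
  · subst h; decide
  rcases eq_or_ne s "manchester city" with h | h_4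
  · subst h; decide
  rcases eq_or_ne s "wolves" with h | h_5
  · subst h; decide
  rcases eq_or_ne s "timberwolves" with h | h_6
  · subst h; decide
  rcases eq_or_ne s "spurs" with h | h_7
  · subst h; decide
  rcases eq_or_ne s "tottenham" with h | h_8
  · subst h; decide
  rcases eq_or_ne s "saints" with h | h_9
  · subst h; decide
  rcases eq_or_ne s "southampton" with h | h_10
  · subst h; decide
  rcases eq_or_ne s "toon" with h | h_11
  · subst h; decide
  rcases eq_or_ne s "newcastle" with h | h_12
  · subst h; decide
  rcases eq_or_ne s "villa" with h | h_13
  · subst h; decide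
  rcases eq_or_ne s "aston villa" with h | h_14
  · subst h; decide
  rcases eq_or_ne s "forest" with h | h_15
  · subst h; decide
  rcases eq_or_ne s "nottingham forest" with h | h_16
  · subst h; decide
  rcases eq_or_ne s "nottm forest" with h | h_17
  · subst h; decide
  rcases eq_or_ne s "west ham" with h | h_18
  · subst h; decide
  rcases eq_or_ne s "west ham united" with h | h_19
  · subst h; decide
  rcases eq_or_ne s "sixers" with h | h_20
  · subst h; decide
  rcases eq_or_ne s "76ers" with h | h_21
  · subst h; decide
  rcases eq_or_ne s "blazers" with h | h_22
  · subst h; decide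
  rcases eq_or_ne s "trail blazers" with h | h_23
  · subst h; decide
  have hget : pvKnown.get? s = none := by
    simp [pvKnown_eval, PySem.Dict.get?, Ne.symm h_0, Ne.symm h_1, Ne.symm h_2, Ne.symm h_3, Ne.symm h_4, Ne.symm h_5, Ne.symm h_6, Ne.symm h_7, Ne.symm h_8, Ne.symm h_9, Ne.symm h_10, Ne.symm h_11, Ne.symm h_12, Ne.symm h_13, Ne.symm h_14, Ne.symm h_15, Ne.symm h_16, Ne.symm h_17, Ne.symm h_18, Ne.symm h_19, Ne.symm h_20, Ne.symm h_21, Ne.symm h_22, Ne.symm h_23]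
  have hfold : pvAliasItems.foldl
      (fun acc p => if p.1 = s then acc ++ [p.2] else if p.2 = s then acc ++ [p.1] else acc)
      [s] = [s] := by
    simp [pvAliasItems, Ne.symm h_0, Ne.symm h_1, Ne.symm h_2, Ne.symm h_3, Ne.symm h_4, Ne.symm h_5, Ne.symm h_6, Ne.symm h_7, Ne.symm h_8, Ne.symm h_9, Ne.symm h_10, Ne.symm h_11, Ne.symm h_12, Ne.symm h_13, Ne.symm h_14, Ne.symm h_15, Ne.symm h_16, Ne.symm h_17, Ne.symm h_18, Ne.symm h_19, Ne.symm h_20, Ne.symm h_21, Ne.symm h_22, Ne.symm h_23]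
  rw [hget, hfold]
  split <;> simp

-- ===== VERDICT (by name: the statement is the Claim_ definition above) =====
set_option maxHeartbeats 1000000 in
theorem expand_team_py_spec : Claim_equal_expand_team_py := by
  intro name _
  simp only [Spec_expand_team_py, expand_team_py, expand_team_py_alt]
  exact pv_core_eq (PySem.Str.strip (PySem.Str.lower name))
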